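-- pv_equiv track=rewrite | github.com/drexon5/polymarket-trader-analyzer | deep_analysis.py | categorize_market
-- ===== SOURCE A (Python) =====
-- def categorize_market(tags):
--     """Categorize market from tags"""
--     if not tags:
--         return 'Other'
--
--     tags_lower = [str(t).lower() for t in tags]
--
--     if any(k in tags_lower for k in ['politics', 'election', 'biden', 'trump', 'congress']):
--         return 'Politics'
--     elif any(k in tags_lower for k in ['sports', 'nba', 'nfl', 'mlb', 'soccer', 'football']):
--         return 'Sports'
--     elif any(k in tags_lower for k in ['crypto', 'bitcoin', 'ethereum', 'btc', 'eth']):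
--         return 'Crypto'
--     elif any(k in tags_lower for k in ['business', 'tech', 'stocks', 'economy']):
--         return 'Business'
--     elif any(k in tags_lower for k in ['entertainment', 'celebrity', 'movies', 'music']):
--         return 'Entertainment'
--     elif any(k in tags_lower for k in ['science', 'ai', 'technology', 'space']):
--         return 'Science'
--     else:
--         return 'Other'
-- ===== SOURCE B (Python) =====
-- KEYWORD_CATEGORY = {
--     'politics': 'Politics', 'election': 'Politics', 'biden': 'Politics',
--     'trump': 'Politics', 'congress': 'Politics',
--     'sports': 'Sports', 'nba': 'Sports', 'nfl': 'Sports', 'mlb': 'Sports',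
--     'soccer': 'Sports', 'football': 'Sports',
--     'crypto': 'Crypto', 'bitcoin': 'Crypto', 'ethereum': 'Crypto',
--     'btc': 'Crypto', 'eth': 'Crypto',
--     'business': 'Business', 'tech': 'Business', 'stocks': 'Business',
--     'economy': 'Business',
--     'entertainment': 'Entertainment', 'celebrity': 'Entertainment',
--     'movies': 'Entertainment', 'music': 'Entertainment',
--     'science': 'Science', 'ai': 'Science', 'technology': 'Science',
--     'space': 'Science',
-- }
--
-- PRIORITY = ['Politics', 'Sports', 'Crypto', 'Business', 'Entertainment', 'Science']
--
--
-- def categorize_market(tags):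
--     """Categorize market from tags: one pass collecting matched categories, then a priority scan."""
--     matched = set()
--     for t in tags:
--         cat = KEYWORD_CATEGORY.get(str(t).lower())
--         if cat is not None:
--             matched.add(cat)
--     for cat in PRIORITY:
--         if cat in matched:
--             return cat
--     return 'Other'
-- ===== Notes on version B (the rewrite author's own statement) =====
-- stated objective: alternative
-- what changed: Replaced the six-branch elif chain of nested membership scans by a keyword-to-category lookup table: one pass over the lowercased tags collects the set of matched categories, then a priority-ordered scan returns the first matched category.
import Mathlib
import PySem

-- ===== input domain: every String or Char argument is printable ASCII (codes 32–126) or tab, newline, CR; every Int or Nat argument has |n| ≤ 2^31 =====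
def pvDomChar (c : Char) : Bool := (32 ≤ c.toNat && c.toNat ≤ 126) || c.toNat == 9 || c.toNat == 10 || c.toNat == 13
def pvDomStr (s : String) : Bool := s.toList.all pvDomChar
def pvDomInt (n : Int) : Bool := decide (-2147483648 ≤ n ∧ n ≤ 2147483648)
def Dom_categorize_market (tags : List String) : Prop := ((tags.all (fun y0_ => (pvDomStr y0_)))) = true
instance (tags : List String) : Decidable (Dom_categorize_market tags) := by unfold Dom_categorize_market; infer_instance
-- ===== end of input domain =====

-- B replaces A's six-branch elif chain of membership scans by a keyword→category lookup table:
-- one collecting pass over the lowercased tags, then a priority-ordered scan (alternative decomposition, same results).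

-- ===== PORT A =====
def categorize_market (tags : List String) : String :=
  if tags = [] then "Other"
  else
    let tags_lower := tags.map PySem.Str.lower
    if ["politics", "election", "biden", "trump", "congress"].any (fun k => tags_lower.contains k) then "Politics"
    else if ["sports", "nba", "nfl", "mlb", "soccer", "football"].any (fun k => tags_lower.contains k) then "Sports"
    else if ["crypto", "bitcoin", "ethereum", "btc", "eth"].any (fun k => tags_lower.contains k) then "Crypto"
    else if ["business", "tech", "stocks", "economy"].any (fun k => tags_lower.contains k) then "Business"
    else if ["entertainment", "celebrity", "movies", "music"].any (fun k => tags_lower.contains k) then "Entertainment"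
    else if ["science", "ai", "technology", "space"].any (fun k => tags_lower.contains k) then "Science"
    else "Other"

-- ===== PORT B =====
-- KWL is the list of pairs of Source B's dict literal KEYWORD_CATEGORY (all keys distinct).
def KWL : List (String × String) :=
  [("politics", "Politics"), ("election", "Politics"), ("biden", "Politics"),
   ("trump", "Politics"), ("congress", "Politics"),
   ("sports", "Sports"), ("nba", "Sports"), ("nfl", "Sports"), ("mlb", "Sports"),
   ("soccer", "Sports"), ("football", "Sports"),
   ("crypto", "Crypto"), ("bitcoin", "Crypto"), ("ethereum", "Crypto"),
   ("btc", "Crypto"), ("eth", "Crypto"),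
   ("business", "Business"), ("tech", "Business"), ("stocks", "Business"),
   ("economy", "Business"),
   ("entertainment", "Entertainment"), ("celebrity", "Entertainment"),
   ("movies", "Entertainment"), ("music", "Entertainment"),
   ("science", "Science"), ("ai", "Science"), ("technology", "Science"),
   ("space", "Science")]

def KEYWORD_CATEGORY : PySem.Dict String String := PySem.Dict.mk KWL

def PRIORITY : List String := ["Politics", "Sports", "Crypto", "Business", "Entertainment", "Science"]

def categorize_market_alt (tags : List String) : String :=
  let matched : PySem.Set String :=
    tags.foldl (fun m t =>
      match PySem.Dict.get? KEYWORD_CATEGORY (PySem.Str.lower t) with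
      | some cat => PySem.Set.add m cat
      | none => m) PySem.Set.empty
  match PRIORITY.find? (fun cat => matched.contains cat) with
  | some cat => cat
  | none => "Other"

-- ===== PRECONDITION & SPEC =====
def Spec_categorize_market (tags : List String) (out : String) : Prop := out = categorize_market_alt tags
instance (tags : List String) (out : String) : Decidable (Spec_categorize_market tags out) := by unfold Spec_categorize_market; infer_instance

-- ===== CLAIM (what is proved, stated in full; the proofs are below) =====
def Claim_equal_categorize_market : Prop := ∀ (tags : List String), Dom_categorize_market tags → Spec_categorize_market tags (categorize_market tags)

-- ===== LEMMAS AND PROOFS =====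

theorem contains_add (s : PySem.Set String) (x c : String) :
    (PySem.Set.add s x).contains c = (s.contains c || x == c) := by
  by_cases hxc : x = c
  · subst hxc
    simp only [PySem.Set.add]
    split_ifs with h <;> simp_all [List.contains_eq_mem]
  · have hb : (x == c) = false := by simp [hxc]
    simp only [PySem.Set.add, hb, Bool.or_false]
    split_ifs with h
    · rfl
    · simp [List.contains_eq_mem, Ne.symm hxc]

theorem contains_matched (tags : List String) (acc : PySem.Set String) (c : String) :
    (tags.foldl (fun m t =>
      match PySem.Dict.get? KEYWORD_CATEGORY (PySem.Str.lower t) with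
      | some cat => PySem.Set.add m cat
      | none => m) acc).contains c
    = (acc.contains c || tags.any (fun t => PySem.Dict.get? KEYWORD_CATEGORY (PySem.Str.lower t) == some c)) := by
  induction tags generalizing acc with
  | nil => simp
  | cons t ts ih =>
    simp only [List.foldl_cons, List.any_cons, ih]
    cases hg : PySem.Dict.get? KEYWORD_CATEGORY (PySem.Str.lower t) with
    | none => simp [hg]
    | some cat => simp [hg, contains_add, Bool.or_assoc, BEq.comm, beq_eq_decide]

theorem get?_mk_of_nodup (L : List (String × String)) (s c : String)
    (h : (L.map Prod.fst).Nodup) :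
    (PySem.Dict.get? (PySem.Dict.mk L) s = some c) ↔ (s, c) ∈ L := by
  induction L with
  | nil => simp [PySem.Dict.get?]
  | cons p rest ih =>
    obtain ⟨k, v⟩ := p
    simp only [List.map_cons, List.nodup_cons, List.mem_map] at h
    rw [PySem.Dict.get?_mk_cons]
    by_cases hks : k = s
    · subst hks
      simp only [if_pos (beq_self_eq_true k), List.mem_cons]
      constructor
      · rintro hv
        exact Or.inl (by simp at hv; simp [hv])
      · rintro (hv | hmem)
        · simp [Prod.ext_iff] at hv; simp [hv]
        · exact absurd ⟨(k, c), hmem, rfl⟩ h.1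
    · rw [if_neg (by simp [hks]), ih h.2]
      simp [Prod.ext_iff, Ne.symm hks]

theorem any_swap (kws tags : List String) (c : String)
    (h : ∀ s, PySem.Dict.get? KEYWORD_CATEGORY s = some c ↔ s ∈ kws) :
    kws.any (fun k => (tags.map PySem.Str.lower).contains k)
      = tags.any (fun t => PySem.Dict.get? KEYWORD_CATEGORY (PySem.Str.lower t) == some c) := by
  rw [Bool.eq_iff_iff]
  simp only [List.any_eq_true, List.contains_eq_mem, List.mem_map, decide_eq_true_eq, beq_iff_eq, h]
  constructor
  · rintro ⟨k, hk, t, ht, rfl⟩; exact ⟨t, ht, hk⟩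
  · rintro ⟨t, ht, hk⟩; exact ⟨_, hk, t, ht, rfl⟩

theorem kw_cat (c : String) (kws : List String)
    (hmem : ∀ s, ((s, c) ∈ KWL ↔ s ∈ kws)) (s : String) :
    PySem.Dict.get? KEYWORD_CATEGORY s = some c ↔ s ∈ kws := by
  rw [KEYWORD_CATEGORY, get?_mk_of_nodup _ _ _ (by decide)]
  exact hmem s

theorem main_eq (tags : List String) : categorize_market tags = categorize_market_alt tags := by
  by_cases h0 : tags = []
  · subst h0; decide
  · unfold categorize_market categorize_market_alt
    rw [if_neg h0]
    simp only [PRIORITY, List.find?, contains_matched]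
    rw [any_swap _ tags "Politics" (kw_cat _ _ (by intro s; simp [KWL, Prod.ext_iff])),
        any_swap _ tags "Sports" (kw_cat _ _ (by intro s; simp [KWL, Prod.ext_iff])),
        any_swap _ tags "Crypto" (kw_cat _ _ (by intro s; simp [KWL, Prod.ext_iff])),
        any_swap _ tags "Business" (kw_cat _ _ (by intro s; simp [KWL, Prod.ext_iff])),
        any_swap _ tags "Entertainment" (kw_cat _ _ (by intro s; simp [KWL, Prod.ext_iff])),
        any_swap _ tags "Science" (kw_cat _ _ (by intro s; simp [KWL, Prod.ext_iff]))]
    simp only [PySem.Set.contains, PySem.Set.empty, List.contains_nil, Bool.false_or]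
    split_ifs <;> simp_all only [Bool.not_eq_true]

-- ===== VERDICT (by name: the statement is the Claim_ definition above) =====
theorem categorize_market_spec : Claim_equal_categorize_market := by
  intro tags _
  unfold Spec_categorize_market
  exact main_eq tags
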